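-- pv_equiv track=rewrite | github.com/ModelEarth/data-pipeline | industries/naics/annual.py | normalize_pre2017_zip_naics2_codes
-- ===== SOURCE A (Python) =====
-- def normalize_pre2017_zip_naics2_codes(codes):
--     code_set = set(str(code) for code in codes)
--     range_groups = [
--         ("31-33", {"31", "32", "33"}),
--         ("44-45", {"44", "45"}),
--         ("48-49", {"48", "49"})
--     ]
--     for range_code, members in range_groups:
--         if code_set & members:
--             code_set -= members
--             code_set.add(range_code)
--     return sorted(code_set)
-- ===== SOURCE B (Python) =====
-- _GROUPS = [
--     ("31-33", ("31", "32", "33")),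
--     ("44-45", ("44", "45")),
--     ("48-49", ("48", "49")),
-- ]
--
--
-- def normalize_pre2017_zip_naics2_codes(codes):
--     strs = {str(code) for code in codes}
--     # plain codes (not in any range group), sorted
--     plain = sorted(s for s in strs if all(s not in members for _, members in _GROUPS))
--     # range labels whose group is hit, already in ascending order
--     labels = [label for label, members in _GROUPS if any(m in strs for m in members)]
--     # linear two-pointer merge of the two sorted lists
--     out = []
--     i = j = 0
--     while i < len(plain) and j < len(labels):
--         if plain[i] < labels[j]:
--             out.append(plain[i])
--             i += 1
--         else:
--             out.append(labels[j])
--             j += 1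
--     out.extend(plain[i:])
--     out.extend(labels[j:])
--     return out
-- ===== Notes on version B (the rewrite author's own statement) =====
-- stated objective: alternative
-- what changed: Instead of A's in-place set mutation over three range groups followed by a global sort, B partitions the deduplicated codes into sorted non-group strings and the (already ordered) hit range labels, and combines the two sorted sequences with a linear two-pointer merge, so the final output is assembled without sorting the combined collection.
import Mathlib
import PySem

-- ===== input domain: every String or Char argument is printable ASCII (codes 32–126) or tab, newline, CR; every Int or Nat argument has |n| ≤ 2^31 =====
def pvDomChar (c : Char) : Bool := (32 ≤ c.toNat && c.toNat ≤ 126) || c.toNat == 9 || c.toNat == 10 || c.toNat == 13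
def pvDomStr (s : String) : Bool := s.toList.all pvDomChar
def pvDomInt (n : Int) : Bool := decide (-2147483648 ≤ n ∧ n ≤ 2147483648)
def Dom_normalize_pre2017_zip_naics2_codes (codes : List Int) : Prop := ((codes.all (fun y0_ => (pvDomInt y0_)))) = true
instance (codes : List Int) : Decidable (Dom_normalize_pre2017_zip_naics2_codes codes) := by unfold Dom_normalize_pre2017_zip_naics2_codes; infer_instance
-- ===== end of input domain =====

-- B replaces A's three-group set-mutation loop by a partition: sorted non-group codes and the hit range labels are built separately and combined by a linear two-pointer merge (alternative decomposition; same result).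


-- ===== PORT A =====
def normalize_pre2017_zip_naics2_codes (codes : List Int) : List String :=
  let code_set : PySem.Set String := PySem.Set.ofList (codes.map PySem.Int.toStr)
  let range_groups : List (String × List String) :=
    [("31-33", ["31", "32", "33"]), ("44-45", ["44", "45"]), ("48-49", ["48", "49"])]
  let code_set := range_groups.foldl (fun cs p =>
    if PySem.Set.inter cs p.2 ≠ [] then
      PySem.Set.add (PySem.Set.diff cs p.2) p.1
    else cs) code_set
  PySem.List.sorted code_set (fun x => x) false

-- ===== PORT B =====
def naicsGroups : List (String × List String) :=
  [("31-33", ["31", "32", "33"]), ("44-45", ["44", "45"]), ("48-49", ["48", "49"])]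

-- the two-pointer merge loop of Source B (while i < len(plain) and j < len(labels): …, then the two extends)
def mergeSortedStr : List String → List String → List String
  | [], ys => ys
  | x :: xs, [] => x :: xs
  | x :: xs, y :: ys =>
    if x < y then x :: mergeSortedStr xs (y :: ys)
    else y :: mergeSortedStr (x :: xs) ys

def normalize_pre2017_zip_naics2_codes_alt (codes : List Int) : List String :=
  let strs : PySem.Set String := PySem.Set.ofList (codes.map PySem.Int.toStr)
  let plain := PySem.List.sorted
    (strs.filter (fun s => naicsGroups.all (fun p => !(p.2.contains s)))) (fun x => x) false
  let labels := (naicsGroups.filter (fun p => p.2.any (fun m => strs.contains m))).map Prod.fst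
  mergeSortedStr plain labels

-- ===== PRECONDITION & SPEC =====
def Spec_normalize_pre2017_zip_naics2_codes (codes : List Int) (out : List String) : Prop := out = normalize_pre2017_zip_naics2_codes_alt codes
instance (codes : List Int) (out : List String) : Decidable (Spec_normalize_pre2017_zip_naics2_codes codes out) := by unfold Spec_normalize_pre2017_zip_naics2_codes; infer_instance

-- ===== CLAIM (what is proved, stated in full; the proofs are below) =====
def Claim_equal_normalize_pre2017_zip_naics2_codes : Prop := ∀ (codes : List Int), Dom_normalize_pre2017_zip_naics2_codes codes → Spec_normalize_pre2017_zip_naics2_codes codes (normalize_pre2017_zip_naics2_codes codes)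

-- ===== LEMMAS AND PROOFS =====

-- A's loop body, as a function of one group.
def nstep (cs : List String) (r : String) (M : List String) : List String :=
  if PySem.Set.inter cs M ≠ [] then PySem.Set.add (PySem.Set.diff cs M) r else cs

lemma mem_nstep (cs : List String) (r : String) (M : List String) (x : String) :
    x ∈ nstep cs r M ↔ (x ∈ cs ∧ x ∉ M) ∨ (x = r ∧ ∃ y ∈ cs, y ∈ M) := by
  unfold nstep
  split_ifs with h
  · simp only [PySem.Set.mem_add, PySem.Set.mem_diff]
    rw [List.ne_nil_iff_exists_cons] at h
    obtain ⟨y, ys, hy⟩ := h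
    have hym : y ∈ cs ∧ y ∈ M := (PySem.Set.mem_inter cs M y).mp (by simp [hy])
    constructor
    · rintro (⟨ha, hb⟩ | rfl)
      · exact Or.inl ⟨ha, hb⟩
      · exact Or.inr ⟨rfl, y, hym.1, hym.2⟩
    · rintro (⟨ha, hb⟩ | ⟨rfl, _⟩)
      · exact Or.inl ⟨ha, hb⟩
      · exact Or.inr rfl
  · push Not at h
    have hemp : ∀ y ∈ cs, y ∉ M := by
      intro y hy hyM
      have : y ∈ PySem.Set.inter cs M := (PySem.Set.mem_inter cs M y).mpr ⟨hy, hyM⟩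
      simp [h] at this
    constructor
    · intro hx; exact Or.inl ⟨hx, hemp x hx⟩
    · rintro (⟨ha, _⟩ | ⟨rfl, y, hy, hyM⟩)
      · exact ha
      · exact absurd hyM (hemp y hy)

lemma nodup_nstep (cs : List String) (r : String) (M : List String) (hnd : cs.Nodup) :
    (nstep cs r M).Nodup := by
  unfold nstep
  split_ifs with h
  · exact PySem.Set.nodup_add _ _ (PySem.Set.nodup_diff _ _ hnd)
  · exact hnd

-- membership in A's final set, stated as B's partition: a plain survivor, or a hit label
lemma mem_pipeline (S : List String) (x : String) :
    x ∈ nstep (nstep (nstep S "31-33" ["31", "32", "33"]) "44-45" ["44", "45"]) "48-49" ["48", "49"]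
      ↔ (x ∈ S ∧ x ∉ (["31", "32", "33"] : List String) ∧ x ∉ (["44", "45"] : List String) ∧ x ∉ (["48", "49"] : List String))
        ∨ (x = "31-33" ∧ ∃ y ∈ S, y ∈ (["31", "32", "33"] : List String))
        ∨ (x = "44-45" ∧ ∃ y ∈ S, y ∈ (["44", "45"] : List String))
        ∨ (x = "48-49" ∧ ∃ y ∈ S, y ∈ (["48", "49"] : List String)) := by
  simp only [mem_nstep]
  constructor
  · intro h
    rcases h with ⟨h2x, hM3⟩ | ⟨rfl, y, hy, hyM3⟩
    · rcases h2x with ⟨h1x, hM2⟩ | ⟨rfl, z, hz, hzM2⟩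
      · rcases h1x with ⟨hS, hM1⟩ | ⟨rfl, w, hw, hwM1⟩
        · exact Or.inl ⟨hS, hM1, hM2, hM3⟩
        · exact Or.inr (Or.inl ⟨rfl, w, hw, hwM1⟩)
      · rcases hz with ⟨hzS, _⟩ | ⟨rfl, _⟩
        · exact Or.inr (Or.inr (Or.inl ⟨rfl, z, hzS, hzM2⟩))
        · exact absurd hzM2 (by decide)
    · rcases hy with ⟨hy1, _⟩ | ⟨rfl, _⟩
      · rcases hy1 with ⟨hyS, _⟩ | ⟨rfl, _⟩
        · exact Or.inr (Or.inr (Or.inr ⟨rfl, y, hyS, hyM3⟩))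
        · exact absurd hyM3 (by decide)
      · exact absurd hyM3 (by decide)
  · intro h
    rcases h with ⟨hS, hM1, hM2, hM3⟩ | ⟨rfl, w, hw, hwM1⟩ | ⟨rfl, z, hz, hzM2⟩ | ⟨rfl, y, hy, hyM3⟩
    · exact Or.inl ⟨Or.inl ⟨Or.inl ⟨hS, hM1⟩, hM2⟩, hM3⟩
    · exact Or.inl ⟨Or.inl ⟨Or.inr ⟨rfl, w, hw, hwM1⟩, by decide⟩, by decide⟩
    · have hz1 : z ∉ (["31", "32", "33"] : List String) := by
        simp only [List.mem_cons, List.not_mem_nil, or_false] at hzM2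
        rcases hzM2 with rfl | rfl <;> decide
      exact Or.inl ⟨Or.inr ⟨rfl, z, Or.inl ⟨hz, hz1⟩, hzM2⟩, by decide⟩
    · have hy1 : y ∉ (["31", "32", "33"] : List String) := by
        simp only [List.mem_cons, List.not_mem_nil, or_false] at hyM3
        rcases hyM3 with rfl | rfl <;> decide
      have hy2 : y ∉ (["44", "45"] : List String) := by
        simp only [List.mem_cons, List.not_mem_nil, or_false] at hyM3
        rcases hyM3 with rfl | rfl <;> decide
      exact Or.inr ⟨rfl, y, Or.inl ⟨Or.inl ⟨hy, hy1⟩, hy2⟩, hyM3⟩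

-- str(int) never contains '-' after the first character, so it is never a range label
lemma digitChar_ne_dash (k : Nat) (hk : k < 10) : Nat.digitChar k ≠ '-' := by
  interval_cases k <;> decide

lemma toDigitsCore_no_dash : ∀ (fuel n : Nat) (acc : List Char), '-' ∉ acc → '-' ∉ Nat.toDigitsCore 10 fuel n acc := by
  intro fuel
  induction fuel with
  | zero => intro n acc h; simpa [Nat.toDigitsCore] using h
  | succ f ih =>
    intro n acc h
    rw [Nat.toDigitsCore]
    split
    · simp only [List.mem_cons, not_or]
      exact ⟨Ne.symm (digitChar_ne_dash _ (Nat.mod_lt _ (by norm_num))), h⟩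
    · exact ih _ _ (by simp only [List.mem_cons, not_or]; exact ⟨Ne.symm (digitChar_ne_dash _ (Nat.mod_lt _ (by norm_num))), h⟩)

lemma toStr_ne_label (n : Int) : PySem.Int.toStr n ∉ (["31-33", "44-45", "48-49"] : List String) := by
  intro h
  simp only [List.mem_cons, List.not_mem_nil, or_false, PySem.Int.toStr] at h
  have hc : PySem.Int.toChars n = ['3','1','-','3','3'] ∨ PySem.Int.toChars n = ['4','4','-','4','5'] ∨ PySem.Int.toChars n = ['4','8','-','4','9'] := by
    rcases h with h | h | h
    · exact Or.inl (String.ofList_inj.mp h)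
    · exact Or.inr (Or.inl (String.ofList_inj.mp h))
    · exact Or.inr (Or.inr (String.ofList_inj.mp h))
  have hdash : '-' ∈ PySem.Int.toChars n := by
    rcases hc with h | h | h <;> rw [h] <;> decide
  have hhead : (PySem.Int.toChars n).head? ≠ some '-' := by
    rcases hc with h | h | h <;> rw [h] <;> decide
  unfold PySem.Int.toChars at hdash hhead
  split_ifs at hdash hhead with hn
  · simp at hhead
  · exact toDigitsCore_no_dash _ _ _ (by simp) hdash

-- the merge loop: a permutation of its two inputs …
lemma merge_perm : ∀ xs ys : List String, (mergeSortedStr xs ys).Perm (xs ++ ys) := by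
  intro xs
  induction xs with
  | nil => intro ys; simp [mergeSortedStr]
  | cons x xs ihx =>
    intro ys
    induction ys with
    | nil => simp [mergeSortedStr]
    | cons y ys ihy =>
      by_cases h : x < y
      · simp only [mergeSortedStr, if_pos h]
        exact (ihx (y :: ys)).cons x
      · simp only [mergeSortedStr, if_neg h]
        exact (ihy.cons y).trans List.perm_middle.symm

-- … and order-preserving
lemma merge_pairwise : ∀ xs ys : List String, xs.Pairwise (· ≤ ·) → ys.Pairwise (· ≤ ·) →
    (mergeSortedStr xs ys).Pairwise (· ≤ ·) := by
  intro xs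
  induction xs with
  | nil => intro ys _ hy; simpa [mergeSortedStr] using hy
  | cons x xs ihx =>
    intro ys hx hy
    induction ys with
    | nil => simpa [mergeSortedStr] using hx
    | cons y ys ihy =>
      rw [List.pairwise_cons] at hx hy
      by_cases h : x < y
      · simp only [mergeSortedStr, if_pos h]
        rw [List.pairwise_cons]
        refine ⟨?_, ihx (y :: ys) hx.2 (List.pairwise_cons.mpr hy)⟩
        intro z hz
        rcases List.mem_append.mp ((merge_perm xs (y :: ys)).mem_iff.mp hz) with hz | hz
        · exact hx.1 z hz
        · rcases List.mem_cons.mp hz with rfl | hz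
          · exact le_of_lt h
          · exact le_trans (le_of_lt h) (hy.1 z hz)
      · simp only [mergeSortedStr, if_neg h]
        rw [List.pairwise_cons]
        refine ⟨?_, ihy hy.2⟩
        intro z hz
        rcases List.mem_append.mp ((merge_perm (x :: xs) ys).mem_iff.mp hz) with hz | hz
        · rcases List.mem_cons.mp hz with rfl | hz
          · exact le_of_not_gt h
          · exact le_trans (le_of_not_gt h) (hx.1 z hz)
        · exact hy.1 z hz

lemma pairwise_lt_of_le_nodup (l : List String) (h1 : l.Pairwise (· ≤ ·)) (h2 : l.Nodup) :
    l.Pairwise (· < ·) :=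
  (h1.and h2).imp (fun h => lt_of_le_of_ne h.1 h.2)

-- ===== VERDICT (by name: the statement is the Claim_ definition above) =====
theorem normalize_pre2017_zip_naics2_codes_spec : Claim_equal_normalize_pre2017_zip_naics2_codes := by
  intro codes _
  unfold Spec_normalize_pre2017_zip_naics2_codes
  unfold normalize_pre2017_zip_naics2_codes normalize_pre2017_zip_naics2_codes_alt
  simp only [List.foldl]
  set S := PySem.Set.ofList (codes.map PySem.Int.toStr) with hS
  set plain := PySem.List.sorted
    (S.filter (fun s => naicsGroups.all (fun p => !(p.2.contains s)))) (fun x => x) false with hplain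
  set labels := (naicsGroups.filter (fun p => p.2.any (fun m => S.contains m))).map Prod.fst with hlabels
  have hndS : S.Nodup := PySem.Set.nodup_ofList _
  -- facts about plain
  have hplain_perm := PySem.List.sorted_perm (S.filter (fun s => naicsGroups.all (fun p => !(p.2.contains s)))) (fun x : String => x) false
  have hplain_nd : plain.Nodup := by
    rw [hplain]; exact hplain_perm.nodup_iff.mpr (hndS.filter _)
  have hplain_mem : ∀ x, x ∈ plain ↔ (x ∈ S ∧ x ∉ (["31", "32", "33"] : List String) ∧ x ∉ (["44", "45"] : List String) ∧ x ∉ (["48", "49"] : List String)) := by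
    intro x
    rw [hplain, PySem.List.mem_sorted, List.mem_filter]
    simp [naicsGroups]
  have hplain_le : plain.Pairwise (· ≤ ·) := by
    rw [hplain]
    exact PySem.List.sorted_pairwise _ _
  -- facts about labels
  have hlabels_sub : labels.Sublist (["31-33", "44-45", "48-49"] : List String) := by
    rw [hlabels]
    have h1 : naicsGroups.map Prod.fst = (["31-33", "44-45", "48-49"] : List String) := rfl
    exact h1 ▸ (List.filter_sublist).map Prod.fst
  have hab : ("31-33" : String) < "44-45" := String.lt_iff_toList_lt.mpr (by decide)
  have hbc : ("44-45" : String) < "48-49" := String.lt_iff_toList_lt.mpr (by decide)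
  have hac : ("31-33" : String) < "48-49" := String.lt_iff_toList_lt.mpr (by decide)
  have hlt3 : (["31-33", "44-45", "48-49"] : List String).Pairwise (· < ·) := by
    refine List.Pairwise.cons ?_ (List.Pairwise.cons ?_ (List.Pairwise.cons ?_ List.Pairwise.nil))
    · intro a ha; fin_cases ha; exacts [hab, hac]
    · intro a ha; fin_cases ha; exact hbc
    · intro a ha; simp at ha
  have hlabels_lt : labels.Pairwise (· < ·) := List.Pairwise.sublist hlabels_sub hlt3
  have hlabels_mem : ∀ x, x ∈ labels ↔ (x = "31-33" ∧ ∃ y ∈ S, y ∈ (["31", "32", "33"] : List String))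
      ∨ (x = "44-45" ∧ ∃ y ∈ S, y ∈ (["44", "45"] : List String))
      ∨ (x = "48-49" ∧ ∃ y ∈ S, y ∈ (["48", "49"] : List String)) := by
    intro x
    rw [hlabels]
    constructor
    · intro hx
      obtain ⟨p, hp, rfl⟩ := List.mem_map.mp hx
      obtain ⟨hpmem, hany⟩ := List.mem_filter.mp hp
      obtain ⟨m, hm, hmS⟩ := List.any_eq_true.mp hany
      have hmS' : m ∈ S := by simpa using hmS
      fin_cases hpmem
      · exact Or.inl ⟨rfl, m, hmS', hm⟩
      · exact Or.inr (Or.inl ⟨rfl, m, hmS', hm⟩)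
      · exact Or.inr (Or.inr ⟨rfl, m, hmS', hm⟩)
    · rintro (⟨rfl, y, hyS, hyM⟩ | ⟨rfl, y, hyS, hyM⟩ | ⟨rfl, y, hyS, hyM⟩)
      · exact List.mem_map.mpr ⟨("31-33", ["31", "32", "33"]),
          List.mem_filter.mpr ⟨by simp [naicsGroups], List.any_eq_true.mpr ⟨y, hyM, by simpa using hyS⟩⟩, rfl⟩
      · exact List.mem_map.mpr ⟨("44-45", ["44", "45"]),
          List.mem_filter.mpr ⟨by simp [naicsGroups], List.any_eq_true.mpr ⟨y, hyM, by simpa using hyS⟩⟩, rfl⟩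
      · exact List.mem_map.mpr ⟨("48-49", ["48", "49"]),
          List.mem_filter.mpr ⟨by simp [naicsGroups], List.any_eq_true.mpr ⟨y, hyM, by simpa using hyS⟩⟩, rfl⟩
  -- disjointness: plain holds only str(int)s, labels only range labels
  have hdisj : ∀ x ∈ plain, x ∉ labels := by
    intro x hx hxl
    obtain ⟨hxS, _⟩ := (hplain_mem x).mp hx
    rw [hS, PySem.Set.mem_ofList, List.mem_map] at hxS
    obtain ⟨c, _, rfl⟩ := hxS
    exact toStr_ne_label c (hlabels_sub.mem hxl)
  have happ_nd : (plain ++ labels).Nodup :=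
    List.Nodup.append hplain_nd hlabels_lt.nodup (List.disjoint_left.mpr hdisj)
  -- the merged list is a strictly increasing permutation of A's final set
  have hmerge_perm' : (mergeSortedStr plain labels).Perm (plain ++ labels) := merge_perm _ _
  have hndA : (nstep (nstep (nstep S "31-33" ["31", "32", "33"]) "44-45" ["44", "45"]) "48-49" ["48", "49"]).Nodup :=
    nodup_nstep _ _ _ (nodup_nstep _ _ _ (nodup_nstep _ _ _ hndS))
  have happ_perm : (plain ++ labels).Perm
      (nstep (nstep (nstep S "31-33" ["31", "32", "33"]) "44-45" ["44", "45"]) "48-49" ["48", "49"]) := by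
    rw [List.perm_ext_iff_of_nodup happ_nd hndA]
    intro x
    rw [mem_pipeline, List.mem_append, hplain_mem, hlabels_mem]
  have hpair : (mergeSortedStr plain labels).Pairwise (· < ·) :=
    pairwise_lt_of_le_nodup _
      (merge_pairwise plain labels hplain_le (hlabels_lt.imp le_of_lt))
      (hmerge_perm'.nodup_iff.mpr happ_nd)
  have := PySem.List.sorted_eq_of_perm_of_pairwise_lt _ _ (fun x : String => x)
    (hmerge_perm'.trans happ_perm) hpair
  simpa [nstep] using this
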